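-- pv_equiv track=rewrite | github.com/ChengTsungPao/LeetCode | 1170_Compare_Strings_by_Frequency_of_the_Smallest_Character/code2.py | numSmallerByFrequency
-- ===== SOURCE A (Python) =====
-- from typing import List
--
-- def numSmallerByFrequency(queries: List[str], words: List[str]) -> List[int]:
--
--     # calculate f(s)
--     for i in range(len(words)):
--         words[i] = words[i].count(min(words[i]))
--
--     for i in range(len(queries)):
--         queries[i] = queries[i].count(min(queries[i]))
--
--     # bucket
--     frequence = [0] * (max(words) + 1)
--     for word in words:
--         frequence[word] += 1
--
--     # preSum
--     for i in range(1, len(frequence)):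
--         frequence[i] += frequence[i - 1]
--
--     # Answer
--     ans = []
--     for querie in queries:
--         if querie < len(frequence):
--             ans.append(frequence[-1] - frequence[querie])
--         else:
--             ans.append(0)
--
--     return ans
-- ===== SOURCE B (Python) =====
-- from bisect import bisect_right
-- from typing import List
--
--
-- def numSmallerByFrequency(queries: List[str], words: List[str]) -> List[int]:
--     def f(s):
--         return s.count(min(s))
--
--     freqs = sorted(f(w) for w in words)
--     n = len(freqs)
--     return [n - bisect_right(freqs, f(q)) for q in queries]
-- ===== Notes on version B (the rewrite author's own statement) =====
-- stated objective: idiomatic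
-- what changed: Replaced the bucket array + in-place prefix-sum machinery (and the in-place overwriting of both input lists) by computing the frequencies functionally, sorting them once and answering each query with len(words) - bisect_right; return values are identical, but B does not mutate its arguments.
import Mathlib
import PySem

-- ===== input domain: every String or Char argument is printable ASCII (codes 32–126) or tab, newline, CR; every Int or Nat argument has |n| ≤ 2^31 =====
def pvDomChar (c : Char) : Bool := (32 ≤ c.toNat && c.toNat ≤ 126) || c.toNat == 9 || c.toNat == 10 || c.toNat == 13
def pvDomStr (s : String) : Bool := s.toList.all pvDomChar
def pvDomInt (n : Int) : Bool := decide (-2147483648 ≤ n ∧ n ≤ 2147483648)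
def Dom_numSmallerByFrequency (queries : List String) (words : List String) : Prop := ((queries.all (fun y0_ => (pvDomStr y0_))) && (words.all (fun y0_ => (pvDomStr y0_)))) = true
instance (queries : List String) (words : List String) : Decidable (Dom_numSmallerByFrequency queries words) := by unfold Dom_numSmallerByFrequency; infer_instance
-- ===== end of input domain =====

-- B replaces A's bucket array + in-place prefix sums with sort + bisect_right (idiomatic, same
-- cost); the equivalence is about the RETURN value only: A overwrites both input lists in place
-- with the frequencies, B does not mutate its arguments.

-- ===== PORT A =====
-- s.count(min(s)) — the same expression appears verbatim in both Python sources, so both ports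
-- share this helper.  Python raises ValueError on min('') — the `none` arm; excluded by Pre_.
def pvF (s : String) : Int :=
  match PySem.List.min? s.toList (fun c => c) with
  | some m => ((PySem.Chars.count s.toList [m] : Nat) : Int)
  | none => 0

-- frequence[word] += 1  (word is in range under Pre_; List.set is a no-op out of range)
def pvBump (fr : List Int) (w : Int) : List Int :=
  fr.set w.toNat (fr.getD w.toNat 0 + 1)

-- for i in range(1, len(frequence)): frequence[i] += frequence[i-1]  — c is the running
-- previous cell frequence[i-1]
def pvPreSumGo (c : Int) : List Int → List Int
  | [] => []
  | x :: xs => (x + c) :: pvPreSumGo (x + c) xs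

def numSmallerByFrequency (queries : List String) (words : List String) : List Int :=
  let ws := words.map pvF
  let qs := queries.map pvF
  -- max(words): Python raises ValueError when words == [] (the `none` arm); excluded by Pre_
  let m : Int := match PySem.List.max? ws (fun x => x) with
    | some v => v
    | none => 0
  let fr0 : List Int := PySem.List.pyRepeat [0] (m + 1)
  let fr1 := ws.foldl pvBump fr0
  let fr2 := match fr1 with
    | [] => []
    | x :: xs => x :: pvPreSumGo x xs
  qs.foldl (fun ans q =>
    ans ++ [if q < (fr2.length : Int)
            then PySem.List.pyGetD fr2 (-1) 0 - PySem.List.pyGetD fr2 q 0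
            else 0]) []

-- ===== PORT B =====
def numSmallerByFrequency_alt (queries : List String) (words : List String) : List Int :=
  let freqs := PySem.List.sorted (words.map pvF) (fun x => x)
  let n := freqs.length
  queries.map (fun q => (n : Int) - (PySem.List.bisectRight freqs (pvF q) : Int))

-- ===== PRECONDITION & SPEC =====
-- Pre_ excludes exactly the inputs on which the Python A raises ValueError: an empty words list
-- (max() of an empty sequence) and any empty string in words or queries (min('')).
def Pre_numSmallerByFrequency (queries : List String) (words : List String) : Prop :=
  words ≠ [] ∧ (∀ s ∈ words, s ≠ "") ∧ (∀ s ∈ queries, s ≠ "")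
instance (queries : List String) (words : List String) : Decidable (Pre_numSmallerByFrequency queries words) := by unfold Pre_numSmallerByFrequency; infer_instance

def pvWitness_numSmallerByFrequency : List String × List String := (["aab", "z"], ["ab", "ccc", "b"])

def Spec_numSmallerByFrequency (queries : List String) (words : List String) (out : List Int) : Prop := out = numSmallerByFrequency_alt queries words
instance (queries : List String) (words : List String) (out : List Int) : Decidable (Spec_numSmallerByFrequency queries words out) := by unfold Spec_numSmallerByFrequency; infer_instance

-- ===== CLAIM (what is proved, stated in full; the proofs are below) =====
def Claim_equal_numSmallerByFrequency : Prop := ∀ (queries : List String) (words : List String), Dom_numSmallerByFrequency queries words → Pre_numSmallerByFrequency queries words → Spec_numSmallerByFrequency queries words (numSmallerByFrequency queries words)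


-- ===== LEMMAS AND PROOFS =====

-- pvF is a cast Nat (or 0), hence never negative
lemma pvF_nonneg (s : String) : 0 ≤ pvF s := by
  unfold pvF
  cases PySem.List.min? s.toList (fun c => c) <;> simp

-- xs[-1] is the last cell
lemma pyGetD_neg_one {α : Type} (xs : List α) (d : α) (h : xs ≠ []) :
    PySem.List.pyGetD xs (-1) d = xs.getD (xs.length - 1) d := by
  have hl : 1 ≤ xs.length := List.length_pos_iff.mpr h
  simp [PySem.List.pyGetD, PySem.List.pyGet?, PySem.List.pyIdx?, List.getD_eq_getElem?_getD]
  rw [if_pos hl]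
  simp

-- the bucket loop: cell j of the folded array counts the occurrences of j
lemma bump_foldl (ws : List Int) : ∀ (fr : List Int),
    (∀ y ∈ ws, 0 ≤ y ∧ y.toNat < fr.length) →
    (ws.foldl pvBump fr).length = fr.length ∧
      ∀ j : Nat, (ws.foldl pvBump fr).getD j 0 = fr.getD j 0 + (ws.count (j : Int) : Int) := by
  induction ws with
  | nil => intro fr _; simp
  | cons y ws ih =>
    intro fr h
    have hy := h y (by simp)
    have hlen : (pvBump fr y).length = fr.length := by simp [pvBump]
    obtain ⟨ih1, ih2⟩ := ih (pvBump fr y) (by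
      intro z hz; rw [hlen]; exact h z (by simp [hz]))
    refine ⟨by simp [List.foldl_cons, ih1, hlen], ?_⟩
    intro j
    rw [List.foldl_cons, ih2 j]
    have hset : (pvBump fr y).getD j 0 =
        if y.toNat = j then fr.getD j 0 + 1 else fr.getD j 0 := by
      simp only [pvBump, List.getD_eq_getElem?_getD, List.getElem?_set]
      split_ifs with h1 h2
      · subst h1; simp
      · omega
      · rfl
    rw [hset]
    by_cases hyj : y = (j : Int)
    · have : y.toNat = j := by omega
      simp [hyj]
      ring
    · have : y.toNat ≠ j := by omega
      simp [this, hyj]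

-- the prefix-sum loop: cell j holds c plus the sum of the first j+1 original cells
lemma preSumGo_spec (xs : List Int) : ∀ (c : Int),
    (pvPreSumGo c xs).length = xs.length ∧
      ∀ j : Nat, j < xs.length →
        (pvPreSumGo c xs).getD j 0 = c + ((xs.take (j + 1)).sum) := by
  induction xs with
  | nil => intro c; simp [pvPreSumGo]
  | cons x xs ih =>
    intro c
    obtain ⟨ih1, ih2⟩ := ih (x + c)
    refine ⟨by simp [pvPreSumGo, ih1], ?_⟩
    intro j hj
    cases j with
    | zero => simp [pvPreSumGo]; ring
    | succ j =>
      have : (pvPreSumGo c (x :: xs)).getD (j + 1) 0 = (pvPreSumGo (x + c) xs).getD j 0 := by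
        simp [pvPreSumGo]
      rw [this, ih2 j (by simpa using hj)]
      simp [List.take_succ_cons]
      ring

-- countP (· ≤ j+1) adds exactly the occurrences of j+1 to countP (· ≤ j)
lemma countP_le_succ (ws : List Int) (j : Int) :
    ws.countP (fun y => decide (y ≤ j + 1)) =
      ws.countP (fun y => decide (y ≤ j)) + ws.count (j + 1) := by
  induction ws with
  | nil => simp
  | cons y ws ih =>
    simp only [List.countP_cons, List.count_cons, ih]
    by_cases h1 : y = j + 1
    · simp [h1]; omega
    · by_cases h2 : y ≤ j
      · have : y ≤ j + 1 := by omega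
        simp [h1, h2, this]; omega
      · have : ¬ y ≤ j + 1 := by omega
        simp [h1, h2, this]

-- for nonnegative data, countP (· ≤ 0) is the number of zeros
lemma countP_le_zero (ws : List Int) (h0 : ∀ y ∈ ws, 0 ≤ y) :
    ws.countP (fun y => decide (y ≤ 0)) = ws.count 0 := by
  induction ws with
  | nil => simp
  | cons y ws ih =>
    have hy := h0 y (by simp)
    have ih' := ih (fun z hz => h0 z (by simp [hz]))
    simp only [List.countP_cons, List.count_cons, ih']
    by_cases h1 : y = 0
    · simp [h1]
    · have : ¬ y ≤ 0 := by omega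
      simp [h1, this]

-- partial sums of the bucket array are cumulative counts
lemma sum_take_counts (L ws : List Int) (h0 : ∀ y ∈ ws, 0 ≤ y)
    (hL : ∀ i : Nat, L.getD i 0 = (ws.count (i : Int) : Int)) :
    ∀ j : Nat, j < L.length →
      (L.take (j + 1)).sum = (ws.countP (fun y => decide (y ≤ (j : Int))) : Int) := by
  intro j
  induction j with
  | zero =>
    intro hj
    have : (L.take 1).sum = L.getD 0 0 := by
      cases L with
      | nil => simp at hj
      | cons a l => simp
    rw [this, hL 0]
    simp only [Nat.cast_zero]
    rw [countP_le_zero ws h0]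
  | succ j ih =>
    intro hj
    rw [List.sum_take_succ L (j + 1) hj]
    have hgd : L[j + 1] = L.getD (j + 1) 0 := by
      simp [List.getD_eq_getElem?_getD, List.getElem?_eq_getElem hj]
    rw [ih (by omega), hgd, hL (j + 1)]
    push_cast
    have hstep := countP_le_succ ws (j : Int)
    omega

-- bisect_right on a sorted list counts the elements ≤ x
lemma bisectRight_countP (xs : List Int) (x : Int)
    (hs : List.Pairwise (fun a b => a ≤ b) xs) :
    PySem.List.bisectRight xs x = xs.countP (fun y => decide (y ≤ x)) := by
  obtain ⟨hk, hlo, hhi⟩ := PySem.List.bisectRight_spec xs x hs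
  set k := PySem.List.bisectRight xs x with hkdef
  conv_rhs => rw [← List.take_append_drop k xs]
  rw [List.countP_append]
  have h1 : (xs.take k).countP (fun y => decide (y ≤ x)) = (xs.take k).length := by
    rw [List.countP_eq_length]
    intro a ha
    obtain ⟨i, hi, hget⟩ := List.getElem_of_mem ha
    have hik : i < k := by simp [List.length_take] at hi; omega
    have hixs : i < xs.length := by simp [List.length_take] at hi; omega
    have hax : xs[i] ≤ x := hlo i hixs hik
    have hai : a = xs[i] := by rw [← hget]; exact List.getElem_take
    simp [hai, hax]
  have h2 : (xs.drop k).countP (fun y => decide (y ≤ x)) = 0 := by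
    rw [List.countP_eq_zero]
    intro a ha
    obtain ⟨i, hi, hget⟩ := List.getElem_of_mem ha
    have hixs : k + i < xs.length := by simp [List.length_drop] at hi; omega
    have hax : x < xs[k + i] := hhi (k + i) hixs (by omega)
    have hai : a = xs[k + i] := by rw [← hget]; exact List.getElem_drop
    simp [hai]
    omega
  rw [h1, h2, List.length_take]
  omega

-- pointwise value of A's answer loop
lemma A_point (ws : List Int) (M : Int)
    (hM : PySem.List.max? ws (fun x => x) = some M)
    (h0 : ∀ y ∈ ws, 0 ≤ y) (q : Int) (hq : 0 ≤ q) :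
    (let fr0 : List Int := PySem.List.pyRepeat [0] (M + 1)
     let fr1 := ws.foldl pvBump fr0
     let fr2 := match fr1 with
       | [] => []
       | x :: xs => x :: pvPreSumGo x xs
     if q < (fr2.length : Int)
     then PySem.List.pyGetD fr2 (-1) 0 - PySem.List.pyGetD fr2 q 0
     else 0) =
      (ws.length : Int) - (ws.countP (fun y => decide (y ≤ q)) : Int) := by
  dsimp only
  have hmax : ∀ y ∈ ws, y ≤ M := fun y hy => PySem.List.max?_isMax hM y hy
  have hMnn : 0 ≤ M := by
    have hmem : M ∈ ws := PySem.List.max?_mem hM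
    exact h0 M hmem
  have hfr0len : (PySem.List.pyRepeat ([0] : List Int) (M + 1)).length = (M + 1).toNat := by
    rw [PySem.List.pyRepeat_singleton]; simp
  obtain ⟨hlen1, hget1⟩ := bump_foldl ws (PySem.List.pyRepeat [0] (M + 1))
    (by intro y hy
        refine ⟨h0 y hy, ?_⟩
        rw [hfr0len]
        have := hmax y hy
        omega)
  set fr1 := ws.foldl pvBump (PySem.List.pyRepeat ([0] : List Int) (M + 1)) with hfr1
  have hlen1' : fr1.length = (M + 1).toNat := by rw [hlen1, hfr0len]
  have hget1' : ∀ i : Nat, fr1.getD i 0 = (ws.count (i : Int) : Int) := by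
    intro i
    rw [hget1 i, PySem.List.pyRepeat_singleton]
    simp [List.getD_eq_getElem?_getD, List.getElem?_replicate]
    split_ifs <;> simp
  have hfr1ne : fr1 ≠ [] := by
    intro hnil; rw [hnil] at hlen1'; simp at hlen1'; omega
  obtain ⟨x, xs, hx⟩ := List.exists_cons_of_ne_nil hfr1ne
  rw [hx]
  dsimp only
  set fr2 : List Int := x :: pvPreSumGo x xs with hfr2
  obtain ⟨hps1, hps2⟩ := preSumGo_spec xs x
  have hlen2 : fr2.length = fr1.length := by simp [hfr2, hx, hps1]
  -- fr2 cell j = partial sum of fr1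
  have hget2 : ∀ j : Nat, j < fr2.length → fr2.getD j 0 = (fr1.take (j + 1)).sum := by
    intro j hj
    cases j with
    | zero => simp [hfr2, hx]
    | succ j =>
      have hj' : j < xs.length := by
        have := hj; simp [hfr2, hps1] at this; omega
      have : fr2.getD (j + 1) 0 = (pvPreSumGo x xs).getD j 0 := by simp [hfr2]
      rw [this, hps2 j hj', hx]
      simp [List.take_succ_cons]
  -- cumulative counts
  have hcum : ∀ j : Nat, j < fr2.length →
      fr2.getD j 0 = (ws.countP (fun y => decide (y ≤ (j : Int))) : Int) := by
    intro j hj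
    rw [hget2 j hj, sum_take_counts fr1 ws h0 hget1' j (by omega)]
  -- last cell = total count
  have hlast : fr2.getD (fr2.length - 1) 0 = (ws.length : Int) := by
    have hpos : 0 < fr2.length := by rw [hlen2, hlen1']; omega
    rw [hcum (fr2.length - 1) (by omega)]
    have hall : ws.countP (fun y => decide (y ≤ ((fr2.length - 1 : Nat) : Int))) = ws.length := by
      rw [List.countP_eq_length]
      intro y hy
      have h1 := hmax y hy
      have h2 : ((fr2.length - 1 : Nat) : Int) = M := by
        rw [hlen2, hlen1']; omega
      simp [h2]; omega
    rw [hall]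
  split_ifs with hlt
  · -- q < len(frequence)
    have hd : (((x :: pvPreSumGo x xs).length : Nat) : Int) = (fr2.length : Int) := by rw [hfr2]
    rw [hd] at hlt
    have hqlt : q.toNat < fr2.length := by omega
    rw [pyGetD_neg_one fr2 0 (by intro h; rw [h] at hlen2; simp at hlen2; omega),
        PySem.List.pyGetD_of_nonneg fr2 0 hq, hlast,
        hcum q.toNat hqlt]
    have : ((q.toNat : Nat) : Int) = q := by omega
    rw [this]
  · -- q ≥ len(frequence): every element is ≤ M < q
    have hd : (((x :: pvPreSumGo x xs).length : Nat) : Int) = (fr2.length : Int) := by rw [hfr2]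
    rw [hd] at hlt
    have hall : ws.countP (fun y => decide (y ≤ q)) = ws.length := by
      rw [List.countP_eq_length]
      intro y hy
      have h1 := hmax y hy
      have h2 : (fr2.length : Int) = M + 1 := by rw [hlen2, hlen1']; omega
      simp; omega
    rw [hall]
    omega

-- ===== VERDICT (by name: the statement is the Claim_ definition above) =====
theorem numSmallerByFrequency_spec : Claim_equal_numSmallerByFrequency := by
  intro queries words _ hpre
  obtain ⟨hwne, hwstr, hqstr⟩ := hpre
  unfold Spec_numSmallerByFrequency numSmallerByFrequency numSmallerByFrequency_alt
  dsimp only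
  set ws := words.map pvF with hws
  have h0 : ∀ y ∈ ws, 0 ≤ y := by
    intro y hy
    obtain ⟨s, _, rfl⟩ := List.mem_map.mp hy
    exact pvF_nonneg s
  have hwsne : ws ≠ [] := by
    simpa [hws] using hwne
  obtain ⟨M, hM⟩ : ∃ M, PySem.List.max? ws (fun x => x) = some M := by
    cases hmx : PySem.List.max? ws (fun x => x) with
    | none => exact absurd ((PySem.List.max?_eq_none_iff ws _).mp hmx) hwsne
    | some v => exact ⟨v, rfl⟩
  rw [hM]
  rw [PySem.List.foldl_append_singleton_eq_map]
  simp only [List.nil_append, List.map_map]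
  apply List.map_congr_left
  intro s _
  simp only [Function.comp_apply]
  have hq : 0 ≤ pvF s := pvF_nonneg s
  have hA := A_point ws M hM h0 (pvF s) hq
  dsimp only at hA
  rw [hA]
  -- B side
  have hsorted := PySem.List.sorted_pairwise ws (fun x => x)
  have hperm : (PySem.List.sorted ws (fun x => x)).Perm ws :=
    PySem.List.sorted_perm ws (fun x => x) false
  rw [bisectRight_countP _ _ hsorted, hperm.countP_eq, PySem.List.length_sorted]
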